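-- pv_equiv track=rewrite | github.com/philhanna/crossword | crossword/domain/grid_generator.py | _line_runs_are_legal
-- ===== SOURCE A (Python) =====
-- from typing import List, Optional, Sequence, Tuple
--
-- WHITE = "."
--
-- def _line_runs_are_legal(line: Sequence[str]) -> bool:
--     """Return True if every maximal WHITE run in line has length >= 3.
--
--     Used for final validation of completed rows and columns.
--     """
--     n = len(line)
--     i = 0
--     while i < n:
--         if line[i] == WHITE:
--             start = i
--             while i < n and line[i] == WHITE:
--                 i += 1
--             if i - start < 3:
--                 return False
--         else:
--             i += 1
--     return True
-- ===== SOURCE B (Python) =====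
-- WHITE = "."
--
-- def _line_runs_are_legal(line):
--     """Return True if every maximal WHITE run in line has length >= 3."""
--     # Run-length encode the line (most recent run kept at the front),
--     # then check every WHITE run's length.
--     runs = []
--     for cell in line:
--         if runs and runs[0][0] == cell:
--             runs[0] = (cell, runs[0][1] + 1)
--         else:
--             runs.insert(0, (cell, 1))
--     return all(c >= 3 for k, c in runs if k == WHITE)
-- ===== Notes on version B (the rewrite author's own statement) =====
-- stated objective: alternative
-- what changed: Replaces the index-based nested while loops (manual start-index tracking and early return) with a single run-length-encoding fold followed by an all() check over the encoded runs.
import Mathlib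
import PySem

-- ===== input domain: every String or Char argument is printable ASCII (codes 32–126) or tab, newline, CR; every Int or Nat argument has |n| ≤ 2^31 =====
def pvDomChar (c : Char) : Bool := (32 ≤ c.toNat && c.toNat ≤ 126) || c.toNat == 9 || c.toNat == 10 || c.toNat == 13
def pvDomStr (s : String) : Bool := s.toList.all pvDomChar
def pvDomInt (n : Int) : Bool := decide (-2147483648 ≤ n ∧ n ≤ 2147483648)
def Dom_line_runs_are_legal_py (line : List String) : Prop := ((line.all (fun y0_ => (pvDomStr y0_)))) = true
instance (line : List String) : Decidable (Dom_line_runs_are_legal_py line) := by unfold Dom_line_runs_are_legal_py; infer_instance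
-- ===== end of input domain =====

-- B replaces A's index-based nested while loops with a run-length-encoding fold
-- followed by an all-runs check (alternative decomposition, same cost).


-- ===== PORT A =====
-- A scans by index: on a WHITE cell it consumes the whole run (inner while),
-- returning False if the run is shorter than 3; otherwise it advances one cell.
-- countDots/dropDots mirror the inner 'while i < n and line[i] == WHITE: i += 1'.
def countDots : List String → Nat
  | [] => 0
  | x :: t => if x = "." then countDots t + 1 else 0

def dropDots : List String → List String
  | [] => []
  | x :: t => if x = "." then dropDots t else x :: t

theorem dropDots_length_le (l : List String) : (dropDots l).length ≤ l.length := by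
  induction l with
  | nil => simp [dropDots]
  | cons x t ih =>
      simp only [dropDots]
      split
      · exact Nat.le_succ_of_le ih
      · simp

def line_runs_are_legal_py (line : List String) : Bool :=
  match line with
  | [] => true
  | x :: t =>
      if x = "." then
        if 1 + countDots t < 3 then false
        else line_runs_are_legal_py (dropDots t)
      else line_runs_are_legal_py t
termination_by line.length
decreasing_by
  · exact Nat.lt_succ_of_le (dropDots_length_le t)
  · exact Nat.lt_succ_self _

-- ===== PORT B =====
-- B's fold step: merge the cell into the front run or start a new run.
def rleStep (acc : List (String × Nat)) (cell : String) : List (String × Nat) :=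
  match acc with
  | (k, c) :: t => if k = cell then (k, c + 1) :: t else (cell, 1) :: (k, c) :: t
  | [] => [(cell, 1)]

def line_runs_are_legal_py_alt (line : List String) : Bool :=
  (line.foldl rleStep []).all (fun kc => if kc.1 = "." then decide (3 ≤ kc.2) else true)

-- ===== PRECONDITION & SPEC =====
def Spec_line_runs_are_legal_py (line : List String) (out : Bool) : Prop := out = line_runs_are_legal_py_alt line
instance (line : List String) (out : Bool) : Decidable (Spec_line_runs_are_legal_py line out) := by unfold Spec_line_runs_are_legal_py; infer_instance

-- ===== CLAIM (what is proved, stated in full; the proofs are below) =====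
def Claim_equal_line_runs_are_legal_py : Prop := ∀ (line : List String), Dom_line_runs_are_legal_py line → Spec_line_runs_are_legal_py line (line_runs_are_legal_py line)

-- ===== LEMMAS AND PROOFS =====
def pvP (kc : String × Nat) : Bool := if kc.1 = "." then decide (3 ≤ kc.2) else true

theorem rleStep_eq {k : String} {c : Nat} {t : List (String × Nat)} {x : String} (h : k = x) :
    rleStep ((k, c) :: t) x = (k, c + 1) :: t := by simp [rleStep, h]

theorem rleStep_ne {k : String} {c : Nat} {t : List (String × Nat)} {x : String} (h : ¬ k = x) :
    rleStep ((k, c) :: t) x = (x, 1) :: (k, c) :: t := by simp [rleStep, h]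

theorem countDots_dot (t : List String) : countDots ("." :: t) = countDots t + 1 := by
  simp [countDots]

theorem countDots_ne {x : String} (h : ¬ x = ".") (t : List String) :
    countDots (x :: t) = 0 := by simp [countDots, h]

theorem dropDots_dot (t : List String) : dropDots ("." :: t) = dropDots t := by
  simp [dropDots]

theorem dropDots_ne {x : String} (h : ¬ x = ".") (t : List String) :
    dropDots (x :: t) = x :: t := by simp [dropDots, h]

theorem alt_eq (line : List String) :
    line_runs_are_legal_py_alt line = (line.foldl rleStep []).all pvP := rfl

-- rleStep only ever inspects/modifies the front of the accumulator, so a nonempty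
-- prefix of the accumulator screens the rest off.
theorem foldl_rleStep_append (rest : List String) :
    ∀ (a : String × Nat) (acc₁ acc₂ : List (String × Nat)),
    List.foldl rleStep ((a :: acc₁) ++ acc₂) rest
      = List.foldl rleStep (a :: acc₁) rest ++ acc₂ := by
  induction rest with
  | nil => intro a acc₁ acc₂; rfl
  | cons x t ih =>
      intro a acc₁ acc₂
      obtain ⟨k, c⟩ := a
      by_cases h : k = x
      · subst h
        rw [List.foldl_cons, List.foldl_cons, List.cons_append, rleStep_eq rfl, rleStep_eq rfl]
        exact ih (k, c + 1) acc₁ acc₂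
      · rw [List.foldl_cons, List.foldl_cons, List.cons_append, rleStep_ne h, rleStep_ne h]
        exact ih (x, 1) ((k, c) :: acc₁) acc₂

-- consuming a leading dot run just increments the front dot-run counter
theorem foldl_rleStep_dots (t : List String) :
    ∀ (c : Nat) (acc : List (String × Nat)),
    List.foldl rleStep ((".", c) :: acc) t
      = List.foldl rleStep ((".", c + countDots t) :: acc) (dropDots t) := by
  induction t with
  | nil => intro c acc; simp [countDots, dropDots]
  | cons x t ih =>
      intro c acc
      by_cases h : x = "."
      · subst h
        rw [List.foldl_cons, rleStep_eq rfl, ih (c + 1) acc,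
            countDots_dot, dropDots_dot]
        have : c + 1 + countDots t = c + (countDots t + 1) := by omega
        rw [this]
      · rw [countDots_ne h, dropDots_ne h, Nat.add_zero]

-- the count on a non-dot front run never affects the verdict
theorem all_count_irrel (rest : List String) :
    ∀ (k : String) (c c' : Nat), k ≠ "." →
    (List.foldl rleStep [(k, c)] rest).all pvP
      = (List.foldl rleStep [(k, c')] rest).all pvP := by
  induction rest with
  | nil =>
      intro k c c' hk
      simp [List.all, pvP, hk]
  | cons x t ih =>
      intro k c c' hk
      by_cases h : k = x
      · rw [List.foldl_cons, List.foldl_cons, rleStep_eq h, rleStep_eq h]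
        exact ih k (c + 1) (c' + 1) hk
      · rw [List.foldl_cons, List.foldl_cons, rleStep_ne h, rleStep_ne h]
        rw [show ((x, 1) :: [(k, c)] : List (String × Nat)) = (x, 1) :: [] ++ [(k, c)] from rfl,
            foldl_rleStep_append t (x, 1) [] [(k, c)]]
        rw [show ((x, 1) :: [(k, c')] : List (String × Nat)) = (x, 1) :: [] ++ [(k, c')] from rfl,
            foldl_rleStep_append t (x, 1) [] [(k, c')]]
        simp [List.all_append, pvP, hk]

-- starting the fold with one fresh non-dot run is the same as starting empty
theorem all_nondot_start (rest : List String) (k : String) (c : Nat) (hk : k ≠ ".") :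
    (List.foldl rleStep [(k, c)] rest).all pvP
      = (List.foldl rleStep [] rest).all pvP := by
  cases rest with
  | nil => simp [List.all, pvP, hk]
  | cons x t =>
      by_cases h : k = x
      · subst h
        rw [List.foldl_cons, List.foldl_cons, rleStep_eq rfl,
            show rleStep [] k = [(k, 1)] from rfl]
        exact all_count_irrel t k (c + 1) 1 hk
      · rw [List.foldl_cons, rleStep_ne h,
            show ((x, 1) :: [(k, c)] : List (String × Nat)) = (x, 1) :: [] ++ [(k, c)] from rfl,
            foldl_rleStep_append t (x, 1) [] [(k, c)],
            List.foldl_cons, show rleStep [] x = [(x, 1)] from rfl]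
        simp [List.all_append, pvP, hk]

theorem dropDots_head_ne (t : List String) :
    dropDots t = [] ∨ ∃ y t', dropDots t = y :: t' ∧ y ≠ "." := by
  induction t with
  | nil => left; rfl
  | cons x t ih =>
      by_cases h : x = "."
      · simpa [dropDots, h] using ih
      · right; exact ⟨x, t, by simp [dropDots, h], h⟩

theorem main_nil : line_runs_are_legal_py [] = (List.foldl rleStep [] []).all pvP := by
  simp [line_runs_are_legal_py]

theorem main_aux (n : Nat) : ∀ l : List String, l.length ≤ n →
    line_runs_are_legal_py l = (List.foldl rleStep [] l).all pvP := by
  induction n with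
  | zero =>
      intro l hl
      have : l = [] := List.eq_nil_of_length_eq_zero (Nat.le_zero.mp hl)
      subst this; exact main_nil
  | succ n ih =>
    intro l hl
    match l, hl with
    | [], _ => exact main_nil
    | x :: t, hl =>
      have hlt : t.length ≤ n := by simpa using hl
      by_cases hx : x = "."
      · subst hx
        rw [line_runs_are_legal_py]
        simp only [reduceIte, List.foldl_cons]
        rw [show rleStep [] "." = [((".":String), 1)] from rfl]
        rw [foldl_rleStep_dots t 1 []]
        have hrec : line_runs_are_legal_py (dropDots t)
            = (List.foldl rleStep [] (dropDots t)).all pvP :=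
          ih (dropDots t) (le_trans (dropDots_length_le t) hlt)
        rcases dropDots_head_ne t with hnil | ⟨y, t', hdd, hy⟩
        · rw [hnil]
          rw [hnil] at hrec
          by_cases hlt : 1 + countDots t < 3
          · simp [List.all, pvP, if_pos hlt]
            omega
          · simp only [if_neg hlt]
            rw [hrec]
            simp [List.all, pvP]
            omega
        · rw [hdd]
          rw [hdd] at hrec
          rw [List.foldl_cons, rleStep_ne (fun hh => hy hh.symm)]
          rw [show ((y, 1) :: [(((".":String)), 1 + countDots t)] : List (String × Nat))
                = (y, 1) :: [] ++ [(((".":String)), 1 + countDots t)] from rfl,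
              foldl_rleStep_append t' (y, 1) [] _]
          rw [List.all_append]
          have hstart := all_nondot_start t' y 1 hy
          by_cases hlt : 1 + countDots t < 3
          · simp only [if_pos hlt]
            simp [List.all, pvP]
            omega
          · simp only [if_neg hlt]
            rw [hrec, List.foldl_cons, show rleStep [] y = [(y, 1)] from rfl]
            simp [List.all, pvP]
            omega
      · rw [line_runs_are_legal_py]
        simp only [if_neg hx, List.foldl_cons]
        rw [show rleStep [] x = [(x, 1)] from rfl]
        rw [all_nondot_start t x 1 hx]
        exact ih t hlt

theorem main_eq (line : List String) :
    line_runs_are_legal_py line = (List.foldl rleStep [] line).all pvP :=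
  main_aux line.length line (le_refl _)

-- ===== VERDICT (by name: the statement is the Claim_ definition above) =====
theorem line_runs_are_legal_py_spec : Claim_equal_line_runs_are_legal_py := by
  intro line _
  unfold Spec_line_runs_are_legal_py
  rw [alt_eq, main_eq]
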